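-- pv_equiv track=rewrite | github.com/KevinYan-831/assignment3 | wavefront_planner.py | generate_navigation_commands
-- ===== SOURCE A (Python) =====
-- def generate_navigation_commands(path, start_heading, goal_heading):
--     """
--     Generate movement commands from a path.
--
--     Args:
--         path: List of (row, col) tuples
--         start_heading: Initial heading (1=North, 2=East, 3=South, 4=West)
--         goal_heading: Desired final heading
--
--     Returns:
--         List of command strings
--     """
--     if len(path) < 2:
--         return []
--
--     commands = []
--     current_heading = start_heading
--
--     for i in range(len(path) - 1):
--         current_row, current_col = path[i]
--         next_row, next_col = path[i + 1]
--
--         # Determine direction of movement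
--         if next_row < current_row:
--             move_direction = "North"
--         elif next_row > current_row:
--             move_direction = "South"
--         elif next_col > current_col:
--             move_direction = "East"
--         elif next_col < current_col:
--             move_direction = "West"
--         else:
--             continue  # Should not happen
--
--         # Determine turn needed
--         turn_needed = get_turn_command(current_heading, move_direction)
--         if turn_needed:
--             commands.append(turn_needed)
--
--         # Move forward
--         commands.append("move_forward")
--
--         # Update heading
--         if move_direction == "North":
--             current_heading = 1
--         elif move_direction == "East":
--             current_heading = 2
--         elif move_direction == "South":
--             current_heading = 3
--         elif move_direction == "West":
--             current_heading = 4
--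
--     # Adjust final heading if needed
--     final_turn = get_turn_command(current_heading, goal_heading)
--     if final_turn:
--         commands.append(final_turn)
--
--     return commands
--
-- def get_turn_command(from_heading, to_heading_or_direction):
--     """
--     Get the turn command to change from one heading to another.
--
--     Args:
--         from_heading: Current heading (1-4 or string name)
--         to_heading_or_direction: Target heading (1-4 or string name)
--
--     Returns:
--         Command string or None if no turn needed
--     """
--     # Convert to numeric
--     heading_map = {"North": 1, "East": 2, "South": 3, "West": 4}
--     reverse_map = {1: "North", 2: "East", 3: "South", 4: "West"}
--
--     if isinstance(from_heading, str):
--         from_heading = heading_map.get(from_heading, from_heading)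
--     if isinstance(to_heading_or_direction, str):
--         to_heading_or_direction = heading_map.get(to_heading_or_direction, to_heading_or_direction)
--
--     from_heading = int(from_heading)
--     to_heading = int(to_heading_or_direction)
--
--     if from_heading == to_heading:
--         return None
--
--     # Calculate turn direction
--     diff = (to_heading - from_heading) % 4
--     if diff == 1:
--         return "turn_left_90"
--     elif diff == 2:
--         return "turn_around_180"
--     elif diff == 3:
--         return "turn_right_90"
--
--     return None
-- ===== SOURCE B (Python) =====
-- _TURN = {1: "turn_left_90", 2: "turn_around_180", 3: "turn_right_90"}
--
-- def generate_navigation_commands(path, start_heading, goal_heading):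
--     if len(path) < 2:
--         return []
--     # step direction codes (1=N,2=E,3=S,4=W) from coordinate-delta signs, row before col
--     dirs = [
--         (2 + (dr > 0) - (dr < 0)) if dr else (3 + (dc < 0) - (dc > 0))
--         for dr, dc in ((nr - r, nc - c) for (r, c), (nr, nc) in zip(path, path[1:]))
--         if dr or dc
--     ]
--     # run-length encode: inside a run no turn is ever needed
--     runs = []
--     for d in dirs:
--         if runs and runs[-1][0] == d:
--             runs[-1][1] += 1
--         else:
--             runs.append([d, 1])
--     # one turn per run (table lookup by heading difference), moves emitted in bulk
--     headings = [start_heading] + [d for d, _ in runs]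
--     out = []
--     for (d, n), h in zip(runs, headings):
--         t = _TURN.get((d - h) % 4)
--         if t:
--             out.append(t)
--         out += ["move_forward"] * n
--     t = _TURN.get((goal_heading - headings[-1]) % 4)
--     if t:
--         out.append(t)
--     return out
-- ===== Notes on version B (the rewrite author's own statement) =====
-- stated objective: alternative
-- what changed: B replaces A's per-step loop (string direction labels, a turn computation at every step) by sign-arithmetic numeric direction codes, a run-length encoding of the direction sequence, and bulk emission: one table-lookup turn per run followed by count-many move_forwards, with the heading sequence precomputed and zipped rather than threaded.
import Mathlib
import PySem

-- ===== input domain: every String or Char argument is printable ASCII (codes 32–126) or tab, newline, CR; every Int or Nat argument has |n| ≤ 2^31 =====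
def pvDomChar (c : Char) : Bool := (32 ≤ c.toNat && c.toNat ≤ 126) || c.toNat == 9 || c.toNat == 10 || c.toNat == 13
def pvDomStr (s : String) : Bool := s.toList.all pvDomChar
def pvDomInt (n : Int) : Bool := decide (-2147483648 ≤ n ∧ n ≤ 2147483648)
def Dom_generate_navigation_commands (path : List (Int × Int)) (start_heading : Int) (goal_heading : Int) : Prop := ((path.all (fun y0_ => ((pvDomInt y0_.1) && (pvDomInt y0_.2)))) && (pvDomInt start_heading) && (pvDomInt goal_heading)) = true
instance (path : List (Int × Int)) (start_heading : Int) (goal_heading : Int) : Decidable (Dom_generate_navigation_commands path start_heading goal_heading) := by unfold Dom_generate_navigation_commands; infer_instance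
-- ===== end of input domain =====

-- B: run-length-encodes the step directions and emits one turn + a block of move_forwards per
-- run, instead of A's per-step loop — an alternative decomposition of the same O(n) task.

-- ===== PORT A =====
-- heading_map lookup: A only applies it to the four direction strings it just produced
def headingMapA (s : String) : Int :=
  if s = "North" then 1 else if s = "East" then 2 else if s = "South" then 3 else 4

-- get_turn_command, as called by A: both arguments already numeric
def get_turn_command (from_heading to_heading : Int) : Option String :=
  if from_heading = to_heading then none
  else
    let diff := PySem.Int.mod (to_heading - from_heading) 4
    if diff = 1 then some "turn_left_90"
    else if diff = 2 then some "turn_around_180"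
    else if diff = 3 then some "turn_right_90"
    else none

-- the for-loop over i in range(len(path)-1), as recursion over consecutive pairs;
-- state = (commands, current_heading)
def loopA : List (Int × Int) → Int → List String → List String × Int
  | p :: q :: rest, current_heading, commands =>
      let move_direction : Option String :=
        if q.1 < p.1 then some "North"
        else if q.1 > p.1 then some "South"
        else if q.2 > p.2 then some "East"
        else if q.2 < p.2 then some "West"
        else none
      match move_direction with
      | none => loopA (q :: rest) current_heading commands  -- continue
      | some dir =>
          let turn_needed := get_turn_command current_heading (headingMapA dir)
          let commands :=
            (match turn_needed with
             | some t => commands ++ [t]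
             | none => commands) ++ ["move_forward"]
          let current_heading :=
            if dir = "North" then 1 else if dir = "East" then 2
            else if dir = "South" then 3 else if dir = "West" then 4 else current_heading
          loopA (q :: rest) current_heading commands
  | _, current_heading, commands => (commands, current_heading)

def generate_navigation_commands (path : List (Int × Int)) (start_heading : Int) (goal_heading : Int) : List String :=
  if path.length < 2 then []
  else
    let st := loopA path start_heading []
    match get_turn_command st.2 goal_heading with
    | some t => st.1 ++ [t]
    | none => st.1

-- ===== PORT B =====
-- _TURN.get((d - h) % 4): the 3-entry dict as an if-chain on the Python mod
def turnAlt (h d : Int) : Option String :=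
  let k := PySem.Int.mod (d - h) 4
  if k = 1 then some "turn_left_90"
  else if k = 2 then some "turn_around_180"
  else if k = 3 then some "turn_right_90"
  else none

-- the dirs comprehension: sign arithmetic on the coordinate deltas, zero steps dropped
def dirsAlt (path : List (Int × Int)) : List Int :=
  (path.zip path.tail).filterMap (fun pq =>
    let dr := pq.2.1 - pq.1.1
    let dc := pq.2.2 - pq.1.2
    if dr ≠ 0 ∨ dc ≠ 0 then
      some (if dr ≠ 0 then 2 + (if dr > 0 then 1 else 0) - (if dr < 0 then 1 else 0)
            else 3 + (if dc < 0 then 1 else 0) - (if dc > 0 then 1 else 0))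
    else none)

-- the run-length-encoding loop; Python mutates runs[-1], so the working list is kept reversed
def rleStep (rs : List (Int × Nat)) (d : Int) : List (Int × Nat) :=
  match rs with
  | (d', n) :: rest => if d' = d then (d', n + 1) :: rest else (d, 1) :: (d', n) :: rest
  | [] => [(d, 1)]

def runsAlt (ds : List Int) : List (Int × Nat) := (ds.foldl rleStep []).reverse

-- the body of `for (d, n), h in zip(runs, headings)`
def emitRun (acc : List String) (x : (Int × Nat) × Int) : List String :=
  (acc ++ (match turnAlt x.2 x.1.1 with | some t => [t] | none => []))
    ++ List.replicate x.1.2 "move_forward"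

def generate_navigation_commands_alt (path : List (Int × Int)) (start_heading : Int) (goal_heading : Int) : List String :=
  if path.length < 2 then []
  else
    let runs := runsAlt (dirsAlt path)
    let headings := start_heading :: runs.map Prod.fst
    let out := (runs.zip headings).foldl emitRun []
    out ++ (match turnAlt headings.getLast! goal_heading with | some t => [t] | none => [])

-- ===== PRECONDITION & SPEC =====
def Spec_generate_navigation_commands (path : List (Int × Int)) (start_heading : Int) (goal_heading : Int) (out : List String) : Prop := out = generate_navigation_commands_alt path start_heading goal_heading
instance (path : List (Int × Int)) (start_heading : Int) (goal_heading : Int) (out : List String) : Decidable (Spec_generate_navigation_commands path start_heading goal_heading out) := by unfold Spec_generate_navigation_commands; infer_instance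

-- ===== CLAIM (what is proved, stated in full; the proofs are below) =====
def Claim_equal_generate_navigation_commands : Prop := ∀ (path : List (Int × Int)) (start_heading : Int) (goal_heading : Int), Dom_generate_navigation_commands path start_heading goal_heading → Spec_generate_navigation_commands path start_heading goal_heading (generate_navigation_commands path start_heading goal_heading)

-- ===== LEMMAS AND PROOFS =====

-- A's get_turn_command equals B's table lookup
theorem turn_eq (f t : Int) : get_turn_command f t = turnAlt f t := by
  have hm : PySem.Int.mod (t - f) 4 = (t - f) % 4 := PySem.Int.mod_eq_emod_of_pos (by norm_num)
  unfold get_turn_command turnAlt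
  simp only [hm]
  by_cases h : f = t
  · subst h; simp
  · have : (t - f) % 4 = 0 ∨ (t - f) % 4 = 1 ∨ (t - f) % 4 = 2 ∨ (t - f) % 4 = 3 := by omega
    rcases this with h0 | h0 | h0 | h0 <;> simp [h, h0]

theorem turn_self (d : Int) : turnAlt d d = none := by
  simp [turnAlt, PySem.Int.mod]

def turnPiece (h d : Int) : List String :=
  match turnAlt h d with | some t => [t] | none => []

-- intermediate form: per-direction emission
def emitDirs : List Int → Int → List String → List String × Int
  | [], h, cmds => (cmds, h)
  | d :: ds, _h, cmds => emitDirs ds d ((cmds ++ turnPiece _h d) ++ ["move_forward"])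

theorem emit_step (d h : Int) (cmds : List String) (ds : List Int) :
    emitDirs (d :: ds) h cmds
      = emitDirs ds d ((match turnAlt h d with
                        | some t => cmds ++ [t]
                        | none => cmds) ++ ["move_forward"]) := by
  simp only [emitDirs, turnPiece]
  cases turnAlt h d <;> simp

-- A's loop equals per-direction emission over B's direction list
theorem loop_eq (path : List (Int × Int)) :
    ∀ (h : Int) (cmds : List String),
      loopA path h cmds = emitDirs (dirsAlt path) h cmds := by
  induction path with
  | nil => intro h cmds; simp [loopA, dirsAlt, emitDirs]
  | cons p rest ih =>
    intro h cmds
    cases rest with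
    | nil => simp [loopA, dirsAlt, emitDirs]
    | cons q rest' =>
      have hdirs : dirsAlt (p :: q :: rest') =
          (if q.1 - p.1 ≠ 0 ∨ q.2 - p.2 ≠ 0 then
            [(if q.1 - p.1 ≠ 0 then 2 + (if q.1 - p.1 > 0 then 1 else 0) - (if q.1 - p.1 < 0 then 1 else 0)
              else 3 + (if q.2 - p.2 < 0 then 1 else 0) - (if q.2 - p.2 > 0 then 1 else 0))]
           else []) ++ dirsAlt (q :: rest') := by
        simp only [dirsAlt, List.tail_cons, List.zip_cons_cons, List.filterMap_cons]
        split_ifs <;> simp_all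
      rw [hdirs]
      by_cases h1 : q.1 < p.1
      · -- North → 1
        have hc : (if q.1 - p.1 ≠ 0 ∨ q.2 - p.2 ≠ 0 then
            [if q.1 - p.1 ≠ 0 then (2 + if q.1 - p.1 > 0 then (1:Int) else 0) - (if q.1 - p.1 < 0 then 1 else 0)
              else (3 + if q.2 - p.2 < 0 then 1 else 0) - (if q.2 - p.2 > 0 then 1 else 0)]
           else ([] : List Int)) = [(1 : Int)] := by
          rw [if_pos (by omega)]
          refine congrArg (fun x => [x]) ?_
          split_ifs <;> omega
        rw [hc]
        simp only [loopA, if_pos h1]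
        rw [ih, List.singleton_append, emit_step]
        simp [headingMapA, turn_eq]
      · by_cases h2 : q.1 > p.1
        · -- South → 3
          have hc : (if q.1 - p.1 ≠ 0 ∨ q.2 - p.2 ≠ 0 then
            [if q.1 - p.1 ≠ 0 then (2 + if q.1 - p.1 > 0 then (1:Int) else 0) - (if q.1 - p.1 < 0 then 1 else 0)
              else (3 + if q.2 - p.2 < 0 then 1 else 0) - (if q.2 - p.2 > 0 then 1 else 0)]
           else ([] : List Int)) = [(3 : Int)] := by
            rw [if_pos (by omega)]
            refine congrArg (fun x => [x]) ?_
            split_ifs <;> omega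
          rw [hc]
          simp only [loopA, if_neg h1, if_pos h2]
          rw [ih, List.singleton_append, emit_step]
          simp [headingMapA, turn_eq]
        · have hr0 : q.1 - p.1 = 0 := by omega
          by_cases h3 : q.2 > p.2
          · -- East → 2
            have hc : (if q.1 - p.1 ≠ 0 ∨ q.2 - p.2 ≠ 0 then
            [if q.1 - p.1 ≠ 0 then (2 + if q.1 - p.1 > 0 then (1:Int) else 0) - (if q.1 - p.1 < 0 then 1 else 0)
              else (3 + if q.2 - p.2 < 0 then 1 else 0) - (if q.2 - p.2 > 0 then 1 else 0)]
           else ([] : List Int)) = [(2 : Int)] := by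
              rw [if_pos (by omega)]
              refine congrArg (fun x => [x]) ?_
              split_ifs <;> omega
            rw [hc]
            simp only [loopA, if_neg h1, if_neg h2, if_pos h3]
            rw [ih, List.singleton_append, emit_step]
            simp [headingMapA, turn_eq]
          · by_cases h4 : q.2 < p.2
            · -- West → 4
              have hc : (if q.1 - p.1 ≠ 0 ∨ q.2 - p.2 ≠ 0 then
            [if q.1 - p.1 ≠ 0 then (2 + if q.1 - p.1 > 0 then (1:Int) else 0) - (if q.1 - p.1 < 0 then 1 else 0)
              else (3 + if q.2 - p.2 < 0 then 1 else 0) - (if q.2 - p.2 > 0 then 1 else 0)]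
           else ([] : List Int)) = [(4 : Int)] := by
                rw [if_pos (by omega)]
                refine congrArg (fun x => [x]) ?_
                split_ifs <;> omega
              rw [hc]
              simp only [loopA, if_neg h1, if_neg h2, if_neg h3, if_pos h4]
              rw [ih, List.singleton_append, emit_step]
              simp [headingMapA, turn_eq]
            · -- no movement
              have hc : (if q.1 - p.1 ≠ 0 ∨ q.2 - p.2 ≠ 0 then
            [if q.1 - p.1 ≠ 0 then (2 + if q.1 - p.1 > 0 then (1:Int) else 0) - (if q.1 - p.1 < 0 then 1 else 0)
              else (3 + if q.2 - p.2 < 0 then 1 else 0) - (if q.2 - p.2 > 0 then 1 else 0)]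
           else ([] : List Int)) = ([] : List Int) := by
                rw [if_neg (by omega)]
              rw [hc]
              simp only [loopA, if_neg h1, if_neg h2, if_neg h3, if_neg h4, List.nil_append]
              exact ih h cmds

-- decode a run list back into the direction sequence
def decodeRuns (rs : List (Int × Nat)) : List Int :=
  rs.flatMap (fun dn => List.replicate dn.2 dn.1)

theorem decode_rleStep (rs : List (Int × Nat)) (d : Int) :
    decodeRuns (rleStep rs d).reverse = decodeRuns rs.reverse ++ [d] := by
  cases rs with
  | nil => simp [rleStep, decodeRuns]
  | cons hd tl =>
    obtain ⟨d', n⟩ := hd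
    by_cases h : d' = d
    · subst h
      simp [rleStep, decodeRuns, List.replicate_succ']
    · simp [rleStep, h, decodeRuns]

theorem decode_foldl (ds : List Int) :
    ∀ acc, decodeRuns (ds.foldl rleStep acc).reverse = decodeRuns acc.reverse ++ ds := by
  induction ds with
  | nil => intro acc; simp
  | cons d ds ih =>
    intro acc
    simp only [List.foldl_cons]
    rw [ih, decode_rleStep]
    simp

theorem decode_runsAlt (ds : List Int) : decodeRuns (runsAlt ds) = ds := by
  have := decode_foldl ds []
  simpa [runsAlt, decodeRuns] using this

theorem rleStep_pos (rs : List (Int × Nat)) (d : Int)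
    (h : ∀ r ∈ rs, 1 ≤ r.2) : ∀ r ∈ rleStep rs d, 1 ≤ r.2 := by
  cases rs with
  | nil =>
    intro r hr
    simp only [rleStep, List.mem_singleton] at hr
    rw [hr]
  | cons hd tl =>
    obtain ⟨d', n⟩ := hd
    intro r hr
    by_cases hde : d' = d
    · simp only [rleStep, if_pos hde, List.mem_cons] at hr
      rcases hr with h1 | h1
      · rw [h1]; exact Nat.succ_le_succ (Nat.zero_le n)
      · exact h r (List.mem_cons_of_mem _ h1)
    · simp only [rleStep, if_neg hde, List.mem_cons] at hr
      rcases hr with h1 | h1 | h1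
      · rw [h1]
      · exact h r (by simp [h1])
      · exact h r (List.mem_cons_of_mem _ h1)

theorem runsAlt_pos (ds : List Int) : ∀ r ∈ runsAlt ds, 1 ≤ r.2 := by
  have : ∀ acc, (∀ r ∈ acc, 1 ≤ r.2) → ∀ r ∈ ds.foldl rleStep acc, 1 ≤ r.2 := by
    induction ds with
    | nil => intro acc h; simpa using h
    | cons d ds ih => intro acc h; exact ih _ (rleStep_pos acc d h)
  intro r hr
  exact this [] (by simp) r (by simpa [runsAlt] using hr)

-- emitting a whole run of n ≥ 1 equal directions: one turn, then n moves
theorem emit_replicate (d : Int) (rest : List Int) :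
    ∀ (n : Nat), 1 ≤ n → ∀ (h : Int) (cmds : List String),
      emitDirs (List.replicate n d ++ rest) h cmds
        = emitDirs rest d ((cmds ++ turnPiece h d) ++ List.replicate n "move_forward") := by
  intro n
  induction n with
  | zero => omega
  | succ m ih =>
    intro _ h cmds
    by_cases hm : m = 0
    · subst hm; simp [emitDirs, List.replicate]
    · rw [List.replicate_succ]
      simp only [List.cons_append, emitDirs]
      rw [ih (by omega)]
      simp [turnPiece, turn_self, List.replicate_succ]

-- per-run recursion matching B's zip-fold
def foldRuns : List (Int × Nat) → Int → List String → List String × Int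
  | [], h, cmds => (cmds, h)
  | (d, n) :: rs, h, cmds =>
      foldRuns rs d ((cmds ++ turnPiece h d) ++ List.replicate n "move_forward")

theorem emit_decode (rs : List (Int × Nat)) :
    ∀ (h : Int) (cmds : List String), (∀ r ∈ rs, 1 ≤ r.2) →
      emitDirs (decodeRuns rs) h cmds = foldRuns rs h cmds := by
  induction rs with
  | nil => intro h cmds _; simp [decodeRuns, emitDirs, foldRuns]
  | cons hd tl ih =>
    obtain ⟨d, n⟩ := hd
    intro h cmds hpos
    have hn : 1 ≤ n := hpos (d, n) (by simp)
    simp only [decodeRuns, List.flatMap_cons, foldRuns]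
    rw [← decodeRuns, emit_replicate d (decodeRuns tl) n hn h cmds]
    exact ih d _ (fun r hr => hpos r (by simp [hr]))

theorem foldRuns_eq (rs : List (Int × Nat)) :
    ∀ (h : Int) (cmds : List String),
      foldRuns rs h cmds
        = ((rs.zip (h :: rs.map Prod.fst)).foldl emitRun cmds,
           (h :: rs.map Prod.fst).getLast!) := by
  induction rs with
  | nil => intro h cmds; simp [foldRuns]
  | cons hd tl ih =>
    obtain ⟨d, n⟩ := hd
    intro h cmds
    simp only [foldRuns, List.map_cons, List.zip_cons_cons, List.foldl_cons]
    rw [ih d]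
    rfl

-- ===== VERDICT (by name: the statement is the Claim_ definition above) =====
theorem generate_navigation_commands_spec : Claim_equal_generate_navigation_commands := by
  intro path sh gh _
  unfold Spec_generate_navigation_commands generate_navigation_commands generate_navigation_commands_alt
  by_cases hlen : path.length < 2
  · simp [hlen]
  · simp only [hlen, if_false]
    rw [loop_eq path sh []]
    rw [← decode_runsAlt (dirsAlt path)]
    rw [emit_decode _ sh [] (runsAlt_pos _)]
    rw [decode_runsAlt]
    rw [foldRuns_eq]
    rw [turn_eq]
    cases htl : turnAlt ((sh :: (runsAlt (dirsAlt path)).map Prod.fst).getLast!) gh <;>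
      simp
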